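-- pv_equiv track=rewrite | github.com/jichong-tay/hackerrank | Functions and OOP/11_itertools.py | performIterator
-- ===== SOURCE A (Python) =====
-- import itertools
--
-- def performIterator(tuplevalues):
--     mainlist = []
--
--     # cycle
--     cycle = itertools.cycle(tuplevalues[0])
--     cyclelist = []
--     for i, letter in enumerate(cycle):
--         cyclelist.append(letter)
--         if i == 3:
--             break
--     mainlist.append(tuple(cyclelist))
--
--     # repeat
--     repeat = tuple(itertools.repeat(tuplevalues[1][0], len(tuplevalues[1])))
--     mainlist.append(repeat)
--
--     # accumulate
--     accumulate = tuple(itertools.accumulate(tuplevalues[2]))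
--     mainlist.append(accumulate)
--
--     # chain
--     mainlist.append(
--         tuple(
--             itertools.chain(
--                 tuplevalues[0], tuplevalues[1], tuplevalues[2], tuplevalues[3]
--             )
--         )
--     )
--
--     # filterfalse
--     mainlist.append(
--         tuple(
--             itertools.filterfalse(lambda x: x % 2 == 0, (itertools.chain(*tuplevalues)))
--         )
--     )
--
--     return tuple(mainlist)
-- ===== SOURCE B (Python) =====
-- def performIterator(tuplevalues):
--     a, b, c, d = tuplevalues[:4]
--
--     def take_cycle(src, rest, k):
--         if k == 0 or not src:
--             return ()
--         if not rest:
--             rest = src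
--         return (rest[0],) + take_cycle(src, rest[1:], k - 1)
--
--     cyc = take_cycle(a, a, 4)
--     rep = tuple(b[:1]) * len(b)
--     acc = tuple(sum(c[:i + 1]) for i in range(len(c)))
--     chainpart = sum((tuple(t) for t in (a, b, c, d)), ())
--     odd = sum((tuple(x for x in sub if x % 2) for sub in tuplevalues), ())
--     return (cyc, rep, acc, chainpart, odd)
-- ===== Notes on version B (the rewrite author's own statement) =====
-- stated objective: alternative
-- what changed: B drops itertools entirely: the cycle is built by a recursive helper that walks a rotating rest-list, repeat by tuple multiplication of b[:1], accumulate by staged slice-sums sum(c[:i+1]) instead of a running value, chain by a sum() fold over the four tuples, and filterfalse by filtering each sublist separately and concatenating with sum() instead of flattening first.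
import Mathlib
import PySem

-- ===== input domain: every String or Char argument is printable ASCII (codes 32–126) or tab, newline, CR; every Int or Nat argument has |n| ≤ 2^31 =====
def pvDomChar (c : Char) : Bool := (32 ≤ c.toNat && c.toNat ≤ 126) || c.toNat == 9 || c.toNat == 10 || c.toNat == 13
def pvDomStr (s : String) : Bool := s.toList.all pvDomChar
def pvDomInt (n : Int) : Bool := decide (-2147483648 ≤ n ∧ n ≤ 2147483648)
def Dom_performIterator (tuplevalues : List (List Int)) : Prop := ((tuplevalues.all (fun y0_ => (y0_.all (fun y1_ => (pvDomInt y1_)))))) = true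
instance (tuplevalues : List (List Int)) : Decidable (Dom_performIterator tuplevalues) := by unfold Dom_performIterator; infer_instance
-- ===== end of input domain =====

-- B rebuilds each of A's itertools pieces by a different mechanism (recursive rotating
-- cycle, tuple multiplication, staged slice-sums, sum() folds over per-sublist filters);
-- objective: alternative, same results without itertools.

-- ===== PORT A =====
-- itertools.accumulate over ints: running value starts at the first element
def pvAccumA : Option Int → List Int → List Int
  | _, [] => []
  | none, x :: xs => x :: pvAccumA (some x) xs
  | some t, x :: xs => (t + x) :: pvAccumA (some (t + x)) xs

def performIterator (tuplevalues : List (List Int)) : List (List Int) :=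
  let a := (PySem.List.pyGet? tuplevalues 0).getD []
  let b := (PySem.List.pyGet? tuplevalues 1).getD []
  let c := (PySem.List.pyGet? tuplevalues 2).getD []
  let d := (PySem.List.pyGet? tuplevalues 3).getD []
  -- enumerate(itertools.cycle(a)) broken at i == 3: first 4 elements of the cycle
  -- (empty when a is empty); exactly the prefix of a ++ a ++ a ++ a
  let cyclelist := if a = [] then [] else (a ++ a ++ a ++ a).take 4
  -- itertools.repeat(b[0], len(b))
  let rep := List.replicate b.length ((PySem.List.pyGet? b 0).getD 0)
  -- itertools.accumulate(c)
  let acc := pvAccumA none c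
  -- itertools.chain(a, b, c, d)
  let ch := a ++ b ++ c ++ d
  -- itertools.filterfalse(lambda x: x % 2 == 0, chain(*tuplevalues))
  let ff := (tuplevalues.flatMap id).filter (fun x => !(PySem.Int.mod x 2 == 0))
  [cyclelist, rep, acc, ch, ff]

-- ===== PORT B =====
-- B's take_cycle(src, rest, k): recursion on k, rotating the rest list
def pvTakeCycle (src : List Int) : List Int → Nat → List Int
  | _, 0 => []
  | rest, k + 1 =>
    if src = [] then []
    else
      let r := if rest = [] then src else rest
      r.headD 0 :: pvTakeCycle src r.tail k

def performIterator_alt (tuplevalues : List (List Int)) : List (List Int) :=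
  let a := (PySem.List.pyGet? tuplevalues 0).getD []
  let b := (PySem.List.pyGet? tuplevalues 1).getD []
  let c := (PySem.List.pyGet? tuplevalues 2).getD []
  let d := (PySem.List.pyGet? tuplevalues 3).getD []
  let cyc := pvTakeCycle a a 4
  -- tuple(b[:1]) * len(b)
  let rep := (List.replicate b.length (b.take 1)).flatten
  -- tuple(sum(c[:i+1]) for i in range(len(c)))
  let acc := (List.range c.length).map (fun i => (c.take (i + 1)).sum)
  -- sum((tuple(t) for t in (a, b, c, d)), ())
  let chainpart := [a, b, c, d].foldl (· ++ ·) []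
  -- sum((tuple(x for x in sub if x % 2) for sub in tuplevalues), ())
  let odd := (tuplevalues.map (fun sub => sub.filter (fun x => PySem.Int.mod x 2 != 0))).foldl (· ++ ·) []
  [cyc, rep, acc, chainpart, odd]

-- ===== PRECONDITION & SPEC =====
-- Pre_ excludes exactly the inputs where A raises IndexError: fewer than 4 sublists,
-- or an empty second sublist (tuplevalues[1][0]).
def Pre_performIterator (tuplevalues : List (List Int)) : Prop :=
  4 ≤ tuplevalues.length ∧ tuplevalues.getD 1 [] ≠ []
instance (tuplevalues : List (List Int)) : Decidable (Pre_performIterator tuplevalues) := by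
  unfold Pre_performIterator; infer_instance
def pvWitness_performIterator : List (List Int) := [[1, 2], [3, 4], [5], [6, 7]]

def Spec_performIterator (tuplevalues : List (List Int)) (out : List (List Int)) : Prop := out = performIterator_alt tuplevalues
instance (tuplevalues : List (List Int)) (out : List (List Int)) : Decidable (Spec_performIterator tuplevalues out) := by unfold Spec_performIterator; infer_instance

-- ===== CLAIM (what is proved, stated in full; the proofs are below) =====
def Claim_equal_performIterator : Prop := ∀ (tuplevalues : List (List Int)), Dom_performIterator tuplevalues → Pre_performIterator tuplevalues → Spec_performIterator tuplevalues (performIterator tuplevalues)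

-- ===== LEMMAS AND PROOFS =====

-- the recursive rotating cycle takes exactly the first 4 elements of a repeated a
theorem cycle_eq (a : List Int) :
    (if a = [] then [] else (a ++ a ++ a ++ a).take 4) = pvTakeCycle a a 4 := by
  match a with
  | [] => rfl
  | [x] => simp [pvTakeCycle]
  | [x, y] => simp [pvTakeCycle]
  | [x, y, z] => simp [pvTakeCycle]
  | x :: y :: z :: w :: rs => simp [pvTakeCycle]

theorem rep_eq (b : List Int) :
    List.replicate b.length ((PySem.List.pyGet? b 0).getD 0)
      = (List.replicate b.length (b.take 1)).flatten := by
  cases b with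
  | nil => rfl
  | cons x xs =>
    simp [PySem.List.pyGet?, PySem.List.pyIdx?]

theorem accum_some (c : List Int) (t : Int) :
    pvAccumA (some t) c = (List.range c.length).map (fun i => t + (c.take (i + 1)).sum) := by
  induction c generalizing t with
  | nil => rfl
  | cons x xs ih =>
    simp only [pvAccumA, List.length_cons, List.range_succ_eq_map, List.map_cons,
      List.map_map, ih]
    congr 1
    · simp
    · apply List.map_congr_left
      intro i _
      simp [List.take_succ_cons]
      ring

theorem accum_eq (c : List Int) :
    pvAccumA none c = (List.range c.length).map (fun i => (c.take (i + 1)).sum) := by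
  cases c with
  | nil => rfl
  | cons x xs =>
    simp only [pvAccumA, List.length_cons, List.range_succ_eq_map, List.map_cons,
      List.map_map, accum_some]
    exact congrArg₂ List.cons (by simp) (List.map_congr_left (fun i _ => by simp [List.take_succ_cons]))

theorem foldl_append_eq (l : List (List Int)) (acc : List Int) :
    l.foldl (· ++ ·) acc = acc ++ l.flatten := by
  induction l generalizing acc with
  | nil => simp
  | cons x xs ih => simp [ih, List.append_assoc]

theorem chain_eq (a b c d : List Int) :
    a ++ b ++ c ++ d = [a, b, c, d].foldl (· ++ ·) [] := by
  simp

theorem filter_flatten_eq (l : List (List Int)) (p : Int → Bool) :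
    (l.flatMap id).filter p = (l.map (fun sub => sub.filter p)).foldl (· ++ ·) [] := by
  induction l with
  | nil => rfl
  | cons x xs ih =>
    simp [List.flatMap_cons, List.filter_append, foldl_append_eq]

theorem odd_pred (x : Int) : (!(PySem.Int.mod x 2 == 0)) = (PySem.Int.mod x 2 != 0) := by
  simp [bne]

-- ===== VERDICT (by name: the statement is the Claim_ definition above) =====
theorem performIterator_spec : Claim_equal_performIterator := by
  intro t _ _
  unfold Spec_performIterator performIterator performIterator_alt
  simp only [cycle_eq]
  simp only [rep_eq, accum_eq, chain_eq, odd_pred, filter_flatten_eq]
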